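-- pv_equiv track=rewrite | github.com/ChristianSB24/Leetcode | Easy/merge_sorted_arrays.py | mergeList2
-- ===== SOURCE A (Python) =====
-- def mergeList2(nums1, m, nums2, n):
--     # In this solution I started from scratch and simply created a new array and then copied it onto the first array.
--     num = []
--     for i in range(m):
--         num.append(nums1[i])
--     for i in range(n):
--         num.append(nums2[i])
--     num = sorted(num)
--     nums1[:] = num[:]
--     return nums1
-- ===== SOURCE B (Python) =====
-- def mergeList2(nums1, m, nums2, n):
--     # Sort the two prefixes separately, then merge them with a two-pointer pass.
--     # (Like A, overwrites nums1 in place and returns it.)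
--     a = sorted([nums1[i] for i in range(m)])
--     b = sorted([nums2[i] for i in range(n)])
--     out = []
--     i = j = 0
--     while i < len(a) and j < len(b):
--         if a[i] <= b[j]:
--             out.append(a[i])
--             i += 1
--         else:
--             out.append(b[j])
--             j += 1
--     out += a[i:] + b[j:]
--     nums1[:] = out
--     return nums1
-- ===== Notes on version B (the rewrite author's own statement) =====
-- stated objective: alternative
-- what changed: A copies both prefixes into one list and sorts the whole thing; B sorts each prefix on its own and combines them with a linear two-pointer merge.
import Mathlib
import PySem

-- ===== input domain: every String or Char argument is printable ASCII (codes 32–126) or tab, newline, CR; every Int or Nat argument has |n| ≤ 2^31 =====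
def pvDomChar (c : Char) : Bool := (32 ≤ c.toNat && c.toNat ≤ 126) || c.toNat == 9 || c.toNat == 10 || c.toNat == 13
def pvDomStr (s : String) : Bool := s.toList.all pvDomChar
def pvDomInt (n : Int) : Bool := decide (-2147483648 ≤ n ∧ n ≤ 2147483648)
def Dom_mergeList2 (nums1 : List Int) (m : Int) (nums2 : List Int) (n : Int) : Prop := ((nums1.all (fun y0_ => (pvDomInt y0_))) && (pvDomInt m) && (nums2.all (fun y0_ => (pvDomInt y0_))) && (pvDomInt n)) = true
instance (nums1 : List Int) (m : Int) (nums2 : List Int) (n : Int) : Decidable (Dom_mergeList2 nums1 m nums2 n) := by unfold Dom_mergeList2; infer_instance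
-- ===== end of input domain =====

-- B sorts each prefix separately and combines them with a two-pointer merge instead of
-- sorting the concatenation; equivalence is about the RETURN value only (the Python A and B
-- both also overwrite nums1 in place).

-- ===== PORT A =====
def mergeList2 (nums1 : List Int) (m : Int) (nums2 : List Int) (n : Int) : List Int :=
  -- num = []; for i in range(m): num.append(nums1[i]); for i in range(n): num.append(nums2[i])
  -- nums1[i] raises IndexError when i is out of range; Pre_ excludes that, so pyGetD is exact there
  let num : List Int := (PySem.List.pyRange 0 m 1).foldl (fun acc i => acc ++ [PySem.List.pyGetD nums1 i 0]) []
  let num := (PySem.List.pyRange 0 n 1).foldl (fun acc i => acc ++ [PySem.List.pyGetD nums2 i 0]) num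
  -- num = sorted(num); nums1[:] = num[:]; return nums1
  PySem.List.sorted num (fun x => x) false

-- ===== PORT B =====
-- the two-pointer while loop of Source B, as recursion on the two suffixes a[i:], b[j:];
-- the fuel argument bounds the number of loop iterations (each step drops one element,
-- so length a + length b fuel is always enough) and keeps the recursion structural
def pvMergeLoop : Nat → List Int → List Int → List Int
  | _, [], ys => ys
  | _, x :: xs, [] => x :: xs
  | 0, xs, ys => xs ++ ys
  | fuel + 1, x :: xs, y :: ys =>
      if x ≤ y then x :: pvMergeLoop fuel xs (y :: ys) else y :: pvMergeLoop fuel (x :: xs) ys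

def pvMerge (a b : List Int) : List Int := pvMergeLoop (a.length + b.length) a b

def mergeList2_alt (nums1 : List Int) (m : Int) (nums2 : List Int) (n : Int) : List Int :=
  -- a = sorted([nums1[i] for i in range(m)]); nums1[i] raises off the prefix, Pre_ excludes that
  let a := PySem.List.sorted ((PySem.List.pyRange 0 m 1).map (fun i => PySem.List.pyGetD nums1 i 0)) (fun x => x) false
  let b := PySem.List.sorted ((PySem.List.pyRange 0 n 1).map (fun i => PySem.List.pyGetD nums2 i 0)) (fun x => x) false
  pvMerge a b

-- ===== PRECONDITION & SPEC =====
-- Pre_ excludes exactly the inputs where A raises IndexError (an index i < m beyond nums1, or i < n beyond nums2)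
def Pre_mergeList2 (nums1 : List Int) (m : Int) (nums2 : List Int) (n : Int) : Prop :=
  m ≤ (nums1.length : Int) ∧ n ≤ (nums2.length : Int)
instance (nums1 : List Int) (m : Int) (nums2 : List Int) (n : Int) : Decidable (Pre_mergeList2 nums1 m nums2 n) := by unfold Pre_mergeList2; infer_instance

def pvWitness_mergeList2 : List Int × Int × List Int × Int := ([1, 3], 2, [2], 1)

def Spec_mergeList2 (nums1 : List Int) (m : Int) (nums2 : List Int) (n : Int) (out : List Int) : Prop := out = mergeList2_alt nums1 m nums2 n
instance (nums1 : List Int) (m : Int) (nums2 : List Int) (n : Int) (out : List Int) : Decidable (Spec_mergeList2 nums1 m nums2 n out) := by unfold Spec_mergeList2; infer_instance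

-- ===== CLAIM (what is proved, stated in full; the proofs are below) =====
def Claim_equal_mergeList2 : Prop := ∀ (nums1 : List Int) (m : Int) (nums2 : List Int) (n : Int), Dom_mergeList2 nums1 m nums2 n → Pre_mergeList2 nums1 m nums2 n → Spec_mergeList2 nums1 m nums2 n (mergeList2 nums1 m nums2 n)

-- ===== LEMMAS AND PROOFS =====

-- '[xs[i] for i in range(m)]' is exactly the prefix xs.take m.toNat, given m ≤ len xs
theorem pvPrefixMap (xs : List Int) (m : Int) (h : m ≤ (xs.length : Int)) :
    (PySem.List.pyRange 0 m 1).map (fun i => PySem.List.pyGetD xs i 0) = xs.take m.toNat := by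
  rw [PySem.List.pyRange_one, List.map_map]
  apply List.ext_getElem
  · simp; omega
  · intro i h1 h2
    simp only [List.getElem_map, List.getElem_range, List.getElem_take, Function.comp]
    have hi : i < xs.length := by simp at h1; omega
    have e : (0 : Int) + ((i : Nat) : Int) = ((i : Nat) : Int) := by omega
    rw [e, PySem.List.pyGetD_natCast, List.getD_eq_getElem?_getD, List.getElem?_eq_getElem hi]
    rfl

-- A's copy loop appends the same prefix element by element
theorem pvPrefixLoop (xs : List Int) (m : Int) (acc : List Int) (h : m ≤ (xs.length : Int)) :
    (PySem.List.pyRange 0 m 1).foldl (fun acc i => acc ++ [PySem.List.pyGetD xs i 0]) acc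
      = acc ++ xs.take m.toNat := by
  rw [PySem.List.foldl_append_singleton_eq_map, pvPrefixMap xs m h]

theorem pvMergeLoop_perm (fuel : Nat) (a b : List Int) (h : a.length + b.length ≤ fuel) :
    (pvMergeLoop fuel a b).Perm (a ++ b) := by
  induction fuel generalizing a b with
  | zero =>
    match a, b with
    | [], ys => simp [pvMergeLoop]
    | x :: xs, [] => simp [pvMergeLoop]
    | x :: xs, y :: ys => simp at h
  | succ fuel ih =>
    match a, b with
    | [], ys => simp [pvMergeLoop]
    | x :: xs, [] => simp [pvMergeLoop]
    | x :: xs, y :: ys =>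
      simp only [pvMergeLoop]
      split
      · exact (ih xs (y :: ys) (by simp at h ⊢; omega)).cons x
      · exact ((ih (x :: xs) ys (by simp at h ⊢; omega)).cons y).trans List.perm_middle.symm

theorem pvMergeLoop_pairwise (fuel : Nat) (a b : List Int) (h : a.length + b.length ≤ fuel)
    (ha : a.Pairwise (· ≤ ·)) (hb : b.Pairwise (· ≤ ·)) :
    (pvMergeLoop fuel a b).Pairwise (· ≤ ·) := by
  induction fuel generalizing a b with
  | zero =>
    match a, b with
    | [], ys => simpa [pvMergeLoop] using hb
    | x :: xs, [] => simpa [pvMergeLoop] using ha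
    | x :: xs, y :: ys => simp at h
  | succ fuel ih =>
    match a, b with
    | [], ys => simpa [pvMergeLoop] using hb
    | x :: xs, [] => simpa [pvMergeLoop] using ha
    | x :: xs, y :: ys =>
      rw [List.pairwise_cons] at ha hb
      simp only [pvMergeLoop]
      split
      · rename_i hxy
        rw [List.pairwise_cons]
        refine ⟨?_, ih xs (y :: ys) (by simp at h ⊢; omega) ha.2 (List.pairwise_cons.mpr hb)⟩
        intro z hz
        rcases List.mem_append.mp ((pvMergeLoop_perm fuel xs (y :: ys) (by simp at h ⊢; omega)).mem_iff.mp hz) with hz' | hz'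
        · exact ha.1 z hz'
        · rcases List.mem_cons.mp hz' with rfl | h2
          · exact hxy
          · exact le_trans hxy (hb.1 z h2)
      · rename_i hxy
        rw [List.pairwise_cons]
        refine ⟨?_, ih (x :: xs) ys (by simp at h ⊢; omega) (List.pairwise_cons.mpr ha) hb.2⟩
        intro z hz
        rcases List.mem_append.mp ((pvMergeLoop_perm fuel (x :: xs) ys (by simp at h ⊢; omega)).mem_iff.mp hz) with hz' | hz'
        · rcases List.mem_cons.mp hz' with rfl | h2
          · omega
          · exact le_trans (by omega) (ha.1 z h2)
        · exact hb.1 z hz'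

-- sorting a concatenation = merging the two sorted halves
theorem pvSortedAppend (s t : List Int) :
    PySem.List.sorted (s ++ t) (fun x => x) false
      = pvMerge (PySem.List.sorted s (fun x => x) false) (PySem.List.sorted t (fun x => x) false) := by
  apply PySem.List.sorted_id_eq_of_perm_of_pairwise
  · exact (pvMergeLoop_perm _ _ _ le_rfl).trans
      ((PySem.List.sorted_perm s (fun x => x) false).append (PySem.List.sorted_perm t (fun x => x) false))
  · exact pvMergeLoop_pairwise _ _ _ le_rfl
      (PySem.List.sorted_pairwise s (fun x => x)) (PySem.List.sorted_pairwise t (fun x => x))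

-- ===== VERDICT (by name: the statement is the Claim_ definition above) =====
theorem mergeList2_spec : Claim_equal_mergeList2 := by
  intro nums1 m nums2 n _ hpre
  obtain ⟨h1, h2⟩ := hpre
  show _ = _
  simp only [mergeList2, mergeList2_alt]
  rw [pvPrefixLoop nums1 m [] h1, pvPrefixLoop nums2 n _ h2, List.nil_append,
      pvPrefixMap nums1 m h1, pvPrefixMap nums2 n h2]
  exact pvSortedAppend _ _
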